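-- pv_equiv track=rewrite | github.com/PurpleBlackMusic/BybitBot | bybit_app/utils/portfolio_manager.py | _cluster_slug
-- ===== SOURCE A (Python) =====
-- def _cluster_slug(value: object) -> str:
--     text = str(value or "").strip().lower()
--     if not text:
--         return ""
--     cleaned = []
--     previous_was_sep = False
--     for char in text:
--         if char.isalnum():
--             cleaned.append(char)
--             previous_was_sep = False
--         elif not previous_was_sep:
--             cleaned.append("_")
--             previous_was_sep = True
--     slug = "".join(cleaned).strip("_")
--     return slug
-- ===== SOURCE B (Python) =====
-- def _cluster_slug(value: object) -> str:
--     text = str(value or "").strip().lower()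
--     if not text:
--         return ""
--     masked = "".join(c if c.isalnum() else " " for c in text)
--     return "_".join(masked.split())
-- ===== Notes on version B (the rewrite author's own statement) =====
-- stated objective: simpler
-- what changed: Replaces the explicit accumulator loop with a previous_was_sep flag plus a final strip of underscores by masking non-alphanumerics to spaces and letting str.split() collapse separator runs and trim the ends, joined with underscores.
import Mathlib
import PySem

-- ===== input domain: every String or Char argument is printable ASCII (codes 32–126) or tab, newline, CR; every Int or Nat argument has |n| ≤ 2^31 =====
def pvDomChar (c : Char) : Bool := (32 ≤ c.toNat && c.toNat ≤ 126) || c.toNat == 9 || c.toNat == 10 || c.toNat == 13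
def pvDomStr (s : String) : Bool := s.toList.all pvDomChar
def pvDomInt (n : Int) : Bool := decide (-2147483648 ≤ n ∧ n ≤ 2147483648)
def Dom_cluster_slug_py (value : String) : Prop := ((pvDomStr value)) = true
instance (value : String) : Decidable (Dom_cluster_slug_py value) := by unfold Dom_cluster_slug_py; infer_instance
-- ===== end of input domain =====

-- B replaces A's previous_was_sep accumulator loop + strip('_') by masking non-alphanumerics
-- to spaces and letting str.split() collapse separator runs and trim the ends (objective: simpler).

-- ===== PORT A =====
def cluster_slug_py (value : String) : String :=
  let text := PySem.Str.lower (PySem.Str.strip (if value == "" then "" else value))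
  if text == "" then ""
  else
    let st := text.toList.foldl
      (fun (s : List Char × Bool) c =>
        if PySem.Chars.isalnum c then (s.1 ++ [c], false)
        else if !s.2 then (s.1 ++ ['_'], true)
        else s) ([], false)
    let slug := PySem.Str.stripChars (String.ofList st.1) "_"
    slug

-- ===== PORT B =====
def cluster_slug_py_alt (value : String) : String :=
  let text := PySem.Str.lower (PySem.Str.strip (if value == "" then "" else value))
  if text == "" then ""
  else
    let masked := String.ofList (text.toList.map
      (fun c => if PySem.Chars.isalnum c then c else ' '))
    PySem.Str.join "_" (PySem.Str.split₀ masked)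

-- ===== PRECONDITION & SPEC =====
def Spec_cluster_slug_py (value : String) (out : String) : Prop := out = cluster_slug_py_alt value
instance (value : String) (out : String) : Decidable (Spec_cluster_slug_py value out) := by unfold Spec_cluster_slug_py; infer_instance

-- ===== CLAIM (what is proved, stated in full; the proofs are below) =====
def Claim_equal_cluster_slug_py : Prop := ∀ (value : String), Dom_cluster_slug_py value → Spec_cluster_slug_py value (cluster_slug_py value)

-- ===== LEMMAS AND PROOFS =====

-- A's loop, written front-to-back (proof-side mirror of the foldl in port A)
def pvLoop : List Char → Bool → List Char
  | [], _ => []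
  | c :: r, prev =>
    if PySem.Chars.isalnum c then c :: pvLoop r false
    else if !prev then '_' :: pvLoop r true
    else pvLoop r prev

-- the maximal alnum runs of a character list
def pvWords (cs : List Char) : List (List Char) :=
  match h : cs.dropWhile (fun c => !PySem.Chars.isalnum c) with
  | [] => []
  | d :: t => (d :: t.takeWhile PySem.Chars.isalnum) :: pvWords (t.dropWhile PySem.Chars.isalnum)
termination_by cs.length
decreasing_by
  have h1 : (cs.dropWhile (fun c => !PySem.Chars.isalnum c)).length ≤ cs.length :=
    List.length_dropWhile_le _ _
  have h2 : (t.dropWhile PySem.Chars.isalnum).length ≤ t.length := List.length_dropWhile_le _ _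
  rw [h] at h1; simp at h1; omega

def pvP (c : Char) : Bool := List.contains ['_'] c

def pvRS (y : List Char) : List Char := (y.reverse.dropWhile pvP).reverse

def pvMask (c : Char) : Char := if PySem.Chars.isalnum c then c else ' '

lemma pv_alnum_nat {c : Char} (h : PySem.Chars.isalnum c = true) :
    (65 ≤ c.val.toNat ∧ c.val.toNat ≤ 90 ∨ 97 ≤ c.val.toNat ∧ c.val.toNat ≤ 122) ∨
      48 ≤ c.val.toNat ∧ c.val.toNat ≤ 57 := by
  have e0 : '0'.val.toNat = 48 := rfl
  have e9 : '9'.val.toNat = 57 := rfl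
  have eA : 'A'.val.toNat = 65 := rfl
  have eZ : 'Z'.val.toNat = 90 := rfl
  have ea : 'a'.val.toNat = 97 := rfl
  have ez : 'z'.val.toNat = 122 := rfl
  simp only [PySem.Chars.isalnum, PySem.Chars.isalpha, PySem.Chars.isdigit,
    PySem.Chars.isupper, PySem.Chars.islower, Bool.or_eq_true, Bool.and_eq_true,
    decide_eq_true_eq, Char.le_def, UInt32.le_iff_toNat_le, e0, e9, eA, eZ, ea, ez] at h
  exact h

lemma pv_alnum_not_space {c : Char} (h : PySem.Chars.isalnum c = true) :
    PySem.Chars.isspace c = false := by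
  have h' := pv_alnum_nat h
  simp only [PySem.Chars.isspace, Char.toNat, Bool.or_eq_false_iff, Bool.and_eq_false_iff,
    decide_eq_false_iff_not]
  omega

lemma pv_alnum_not_us {c : Char} (h : PySem.Chars.isalnum c = true) : pvP c = false := by
  have h' := pv_alnum_nat h
  have eu : '_'.val.toNat = 95 := rfl
  simp only [pvP, List.contains, List.elem_cons, List.elem_nil]
  have hc : (c == '_') = false := by
    rcases Bool.eq_false_or_eq_true (c == '_') with hb2 | hb2
    · have hce : c = '_' := beq_iff_eq.mp hb2
      subst hce
      simp at h'
    · exact hb2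
  simp [hc]

lemma pvWords_nil : pvWords [] = [] := by
  rw [pvWords]
  rfl

lemma pvWords_sep {c : Char} (cs : List Char) (h : PySem.Chars.isalnum c = false) :
    pvWords (c :: cs) = pvWords cs := by
  conv_lhs => rw [pvWords]
  conv_rhs => rw [pvWords]
  rw [List.dropWhile_cons, h]
  rfl

lemma pvWords_alnum {c : Char} (cs : List Char) (h : PySem.Chars.isalnum c = true) :
    pvWords (c :: cs) = (c :: cs.takeWhile PySem.Chars.isalnum) ::
      pvWords (cs.dropWhile PySem.Chars.isalnum) := by
  conv_lhs => rw [pvWords]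
  rw [List.dropWhile_cons, h]
  rfl

lemma pvWords_ne_nil {cs : List Char} {w : List Char} {ws : List (List Char)}
    (h : pvWords cs = w :: ws) : w ≠ [] := by
  rw [pvWords] at h
  split at h
  · simp at h
  · simp at h
    intro hw
    rw [hw] at h
    simp at h

lemma pvJoin_nil : PySem.Chars.join ['_'] [] = [] := rfl

lemma pvJoin_cons (w : List Char) (ws : List (List Char)) :
    PySem.Chars.join ['_'] (w :: ws) =
      w ++ (if ws = [] then [] else '_' :: PySem.Chars.join ['_'] ws) := by
  cases ws with
  | nil => simp [PySem.Chars.join, List.intercalate, List.intersperse]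
  | cons y ys => simp [PySem.Chars.join, List.intercalate, List.intersperse]

lemma pvJoin_ne_nil {cs : List Char} {w : List Char} {ws : List (List Char)}
    (h : pvWords cs = w :: ws) : PySem.Chars.join ['_'] (pvWords cs) ≠ [] := by
  rw [h, pvJoin_cons]
  have hw := pvWords_ne_nil h
  intro hn
  rcases List.append_eq_nil_iff.mp hn with ⟨h1, _⟩
  exact hw h1

lemma pvGo (cs : List Char) : ∀ (cur : List Char) (accs : List (List Char)),
    PySem.Chars.split₀.go (cs.map pvMask) cur accs =
      accs.reverse ++ (if cur = [] then pvWords cs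
        else (cur.reverse ++ cs.takeWhile PySem.Chars.isalnum) ::
          pvWords (cs.dropWhile PySem.Chars.isalnum)) := by
  induction cs with
  | nil =>
    intro cur accs
    by_cases hc : cur = []
    · subst hc; simp [PySem.Chars.split₀.go, pvWords_nil]
    · simp [PySem.Chars.split₀.go, hc, List.isEmpty_iff, pvWords_nil]
  | cons c rest ih =>
    intro cur accs
    by_cases halnum : PySem.Chars.isalnum c = true
    · have hm : pvMask c = c := by simp [pvMask, halnum]
      have hsp := pv_alnum_not_space halnum
      simp only [List.map_cons, hm]
      rw [PySem.Chars.split₀.go, hsp]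
      simp only [Bool.false_eq_true, if_false]
      rw [ih (c :: cur) accs]
      by_cases hc : cur = []
      · subst hc
        simp [pvWords_alnum rest halnum]
      · simp only [hc, if_neg, reduceCtorEq, List.reverse_cons,
          List.takeWhile_cons_of_pos halnum, List.dropWhile_cons_of_pos halnum]
        simp [hc, List.append_assoc]
    · have halnum' : PySem.Chars.isalnum c = false := Bool.eq_false_iff.mpr halnum
      have hm : pvMask c = ' ' := by simp [pvMask, halnum']
      have hsp : PySem.Chars.isspace ' ' = true := rfl
      simp only [List.map_cons, hm]
      rw [PySem.Chars.split₀.go, hsp]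
      simp only [if_true]
      by_cases hc : cur = []
      · subst hc
        simp only [List.isEmpty_nil, if_true, ih [] accs]
        simp [pvWords_sep rest halnum']
      · rw [if_neg (by simpa [List.isEmpty_iff] using hc)]
        rw [ih [] (cur.reverse :: accs)]
        have ht : List.takeWhile PySem.Chars.isalnum (c :: rest) = [] := by
          rw [List.takeWhile_cons_of_neg]; simp [halnum']
        have hd2 : List.dropWhile PySem.Chars.isalnum (c :: rest) = c :: rest := by
          rw [List.dropWhile_cons_of_neg]; simp [halnum']
        simp [hc, ht, hd2, pvWords_sep rest halnum']

lemma pvSplit (cs : List Char) :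
    PySem.Chars.split₀ (cs.map pvMask) = pvWords cs := by
  have := pvGo cs [] []
  simpa [PySem.Chars.split₀] using this

lemma pvFold (cs : List Char) : ∀ (acc : List Char) (prev : Bool),
    (cs.foldl (fun (s : List Char × Bool) c =>
        if PySem.Chars.isalnum c then (s.1 ++ [c], false)
        else if !s.2 then (s.1 ++ ['_'], true)
        else s) (acc, prev)).1 = acc ++ pvLoop cs prev := by
  induction cs with
  | nil => intro acc prev; simp [pvLoop]
  | cons c rest ih =>
    intro acc prev
    rw [List.foldl_cons]
    by_cases halnum : PySem.Chars.isalnum c = true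
    · simp only [halnum, if_true, pvLoop, ih]
      simp
    · have halnum' : PySem.Chars.isalnum c = false := Bool.eq_false_iff.mpr halnum
      cases prev with
      | false =>
        simp only [halnum', Bool.false_eq_true, if_false, Bool.not_false, if_true, pvLoop, ih]
        simp
      | true =>
        simp only [halnum', Bool.false_eq_true, if_false, Bool.not_true, pvLoop, ih]

lemma pvRS_nil : pvRS [] = [] := rfl

lemma pvRS_cons_ne {c : Char} (h : pvP c = false) (y : List Char) :
    pvRS (c :: y) = c :: pvRS y := by
  unfold pvRS
  rw [List.reverse_cons, List.dropWhile_append]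
  by_cases he : (y.reverse.dropWhile pvP) = []
  · simp [he, List.dropWhile_cons, h]
  · rw [if_neg (by simpa [List.isEmpty_iff] using he)]
    simp

lemma pvRS_cons_us (y : List Char) :
    pvRS ('_' :: y) = if pvRS y = [] then [] else '_' :: pvRS y := by
  unfold pvRS
  rw [List.reverse_cons, List.dropWhile_append]
  have hp : pvP '_' = true := rfl
  by_cases he : (y.reverse.dropWhile pvP) = []
  · simp [he, List.dropWhile_cons, hp]
  · rw [if_neg (by simpa [List.isEmpty_iff] using he)]
    simp [he]

def pvLead (cs : List Char) : List Char :=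
  if (match cs.head? with | some c => !PySem.Chars.isalnum c | none => false) = true
      ∧ pvWords cs ≠ [] then ['_'] else []

lemma pvTRS (cs : List Char) :
    pvRS (pvLoop cs true) = PySem.Chars.join ['_'] (pvWords cs)
    ∧ pvRS (pvLoop cs false) = pvLead cs ++ PySem.Chars.join ['_'] (pvWords cs) := by
  induction cs with
  | nil => exact ⟨by simp [pvLoop, pvRS_nil, pvWords_nil, pvJoin_nil],
      by simp [pvLoop, pvRS_nil, pvWords_nil, pvJoin_nil, pvLead]⟩
  | cons c r ih =>
    obtain ⟨ihT, ihF⟩ := ih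
    by_cases halnum : PySem.Chars.isalnum c = true
    · have hl : pvLoop (c :: r) true = c :: pvLoop r false := by simp [pvLoop, halnum]
      have hl' : pvLoop (c :: r) false = c :: pvLoop r false := by simp [pvLoop, halnum]
      have hrs : pvRS (c :: pvLoop r false) = c :: pvRS (pvLoop r false) :=
        pvRS_cons_ne (pv_alnum_not_us halnum) _
      have key : c :: pvRS (pvLoop r false) =
          PySem.Chars.join ['_'] (pvWords (c :: r)) := by
        rw [ihF, pvWords_alnum r halnum, pvJoin_cons]
        cases r with
        | nil =>
          simp [pvWords_nil, pvLead, pvJoin_nil]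
        | cons d t =>
          by_cases hd : PySem.Chars.isalnum d = true
          · rw [List.takeWhile_cons_of_pos hd, List.dropWhile_cons_of_pos hd]
            have hw := pvWords_alnum t hd
            rw [hw, pvJoin_cons]
            have : pvLead (d :: t) = [] := by simp [pvLead, hd]
            simp [this]
          · have hd' : PySem.Chars.isalnum d = false := Bool.eq_false_iff.mpr hd
            rw [List.takeWhile_cons_of_neg (by simp [hd']),
              List.dropWhile_cons_of_neg (by simp [hd'])]
            rw [pvWords_sep t hd']
            rcases hws : pvWords t with _ | ⟨w, ws⟩
            · simp [pvLead, hws, pvWords_sep t hd', pvJoin_nil]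
            · have hne : PySem.Chars.join ['_'] (pvWords t) ≠ [] := pvJoin_ne_nil hws
              have : pvLead (d :: t) = ['_'] := by
                simp [pvLead, hd', pvWords_sep t hd', hws]
              rw [pvWords_sep t hd'] at *
              simp [this, hws]
      constructor
      · rw [hl, hrs, key]
      · rw [hl', hrs, key]
        have : pvLead (c :: r) = [] := by simp [pvLead, halnum]
        simp [this]
    · have halnum' : PySem.Chars.isalnum c = false := Bool.eq_false_iff.mpr halnum
      have hl : pvLoop (c :: r) true = pvLoop r true := by simp [pvLoop, halnum']
      have hl' : pvLoop (c :: r) false = '_' :: pvLoop r true := by simp [pvLoop, halnum']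
      have hwe : pvWords (c :: r) = pvWords r := pvWords_sep r halnum'
      constructor
      · rw [hl, hwe]; exact ihT
      · rw [hl', pvRS_cons_us, ihT, hwe]
        rcases hws : pvWords r with _ | ⟨w, ws⟩
        · simp [hws, pvJoin_nil, pvLead, hwe]
        · have hne : PySem.Chars.join ['_'] (pvWords r) ≠ [] := pvJoin_ne_nil hws
          rw [hws] at hne
          have hld : pvLead (c :: r) = ['_'] := by
            simp [pvLead, halnum', hwe, hws]
          simp [hne, hld, hws]

lemma pvNoLead (cs : List Char) :
    (pvLoop cs true).dropWhile pvP = pvLoop cs true := by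
  induction cs with
  | nil => simp [pvLoop]
  | cons c r ih =>
    by_cases halnum : PySem.Chars.isalnum c = true
    · simp [pvLoop, halnum, List.dropWhile_cons, pv_alnum_not_us halnum]
    · have halnum' : PySem.Chars.isalnum c = false := Bool.eq_false_iff.mpr halnum
      simpa [pvLoop, halnum'] using ih

lemma pvStrip_eq (s : List Char) :
    PySem.Chars.stripChars s ['_'] = pvRS (s.dropWhile pvP) := rfl

lemma pvMain (cs : List Char) :
    PySem.Chars.stripChars (pvLoop cs false) ['_'] =
      PySem.Chars.join ['_'] (pvWords cs) := by
  rw [pvStrip_eq]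
  cases cs with
  | nil => simp [pvLoop, pvRS_nil, pvWords_nil, pvJoin_nil]
  | cons c r =>
    by_cases halnum : PySem.Chars.isalnum c = true
    · have hl : pvLoop (c :: r) false = c :: pvLoop r false := by simp [pvLoop, halnum]
      rw [hl, List.dropWhile_cons_of_neg (by simp [pv_alnum_not_us halnum]), ← hl]
      rw [(pvTRS (c :: r)).2]
      have : pvLead (c :: r) = [] := by simp [pvLead, halnum]
      simp [this]
    · have halnum' : PySem.Chars.isalnum c = false := Bool.eq_false_iff.mpr halnum
      have hl : pvLoop (c :: r) false = '_' :: pvLoop r true := by simp [pvLoop, halnum']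
      have hp : pvP '_' = true := rfl
      rw [hl, List.dropWhile_cons_of_pos hp, pvNoLead, (pvTRS r).1, pvWords_sep r halnum']

-- ===== VERDICT (by name: the statement is the Claim_ definition above) =====
theorem cluster_slug_py_spec : Claim_equal_cluster_slug_py := by
  intro value _
  unfold Spec_cluster_slug_py cluster_slug_py cluster_slug_py_alt
  by_cases h : (PySem.Str.lower (PySem.Str.strip (if value == "" then "" else value))) == ""
  · simp only [h, if_true]
  · simp only [h, Bool.false_eq_true, if_false]
    set cs := (PySem.Str.lower (PySem.Str.strip (if value == "" then "" else value))).toList with hcs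
    have hfold := pvFold cs [] false
    have hmask : (cs.map (fun c => if PySem.Chars.isalnum c then c else ' ')) = cs.map pvMask := rfl
    rw [PySem.Str.stripChars, PySem.Str.join, PySem.Str.split₀]
    rw [hfold]
    simp only [List.nil_append, String.toList_ofList, hmask, pvSplit]
    have hsep : ("_" : String).toList = ['_'] := rfl
    rw [hsep, List.map_map]
    have hid : (String.toList ∘ String.ofList) = id := by
      funext l; simp
    rw [hid, List.map_id]
    exact congrArg String.ofList (pvMain cs)
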